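-- pv_equiv track=rewrite | github.com/SquirmyWormy275/Missoula-Pro-Am-Manager | tests/verify_losers_bracket.py | expected_losers_bracket
-- ===== SOURCE A (Python) =====
-- import math
--
-- def expected_losers_bracket(bracket_size):
--     """
--     Compute the correct losers bracket structure for standard double elimination.
--
--     In standard double elimination for bracket_size B:
--       - Winners bracket has log2(B) rounds
--       - Losers bracket has 2*(log2(B) - 1) rounds
--
--     The losers bracket alternates between two types of rounds:
--       Round type A (odd rounds 1, 3, 5, ...): "drop-down" round
--         - Losers from the corresponding winners round drop down and play
--           against survivors from the previous losers round (or each other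
--           in round 1).
--         - Match count = winners_round_losers / 2 for round 1,
--           or = previous_round_survivors for subsequent A rounds.
--
--       Round type B (even rounds 2, 4, 6, ...): "play-down" round
--         - No new drop-downs. Losers bracket survivors play each other.
--         - Match count halves.
--
--     For B=4 (2 winners rounds):
--       LB rounds: 2
--       L1: 1 match (W1 losers play each other: 2 losers → 1 match)
--       L2: 1 match (L1 winner vs W2 loser → 1 match)
--
--     For B=8 (3 winners rounds):
--       LB rounds: 4
--       L1: 2 matches (W1 losers: 4 losers → 2 matches)
--       L2: 2 matches (L1 winners [2] vs W2 losers [2] → 2 matches)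
--       L3: 1 match (L2 winners [2] play each other → 1 match)
--       L4: 1 match (L3 winner vs W3 loser → 1 match)
--
--     For B=16 (4 winners rounds):
--       LB rounds: 6
--       L1: 4 matches (W1 losers: 8 losers → 4 matches)
--       L2: 4 matches (L1 winners [4] vs W2 losers [4] → 4 matches)
--       L3: 2 matches (L2 winners [4] play each other → 2 matches)
--       L4: 2 matches (L3 winners [2] vs W3 losers [2] → 2 matches)
--       L5: 1 match  (L4 winners [2] play each other → 1 match)
--       L6: 1 match  (L5 winner vs W4 loser → 1 match)
--     """
--     num_winners_rounds = int(math.log2(bracket_size))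
--     num_losers_rounds = 2 * (num_winners_rounds - 1)
--
--     rounds = []
--     # W1 produces bracket_size/2 losers
--     survivors = bracket_size // 2  # losers from W1
--
--     for lr in range(1, num_losers_rounds + 1):
--         if lr == 1:
--             # Round 1: W1 losers play each other
--             matches = survivors // 2
--             survivors = matches  # winners advance
--         elif lr % 2 == 0:
--             # Even round (drop-down): survivors from prev LB round vs
--             # losers dropping from the corresponding winners round.
--             # Which winners round drops here? W_round = (lr // 2) + 1
--             w_round_idx = lr // 2  # 0-indexed winners round that drops losers
--             # The number of losers dropping = matches in that winners round
--             w_round_matches = bracket_size // (2 ** (w_round_idx + 1))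
--             # Each drop-down loser pairs with one LB survivor
--             matches = min(survivors, w_round_matches)
--             survivors = matches
--         else:
--             # Odd round > 1 (play-down): LB survivors play each other
--             matches = survivors // 2
--             survivors = matches
--
--         rounds.append(matches)
--
--     return rounds
-- ===== SOURCE B (Python) =====
-- import math
--
-- def expected_losers_bracket(bracket_size):
--     # Pairs of a halving sequence: the even-round min() in A is never binding,
--     # so each round count appears twice, starting at bracket_size//4.
--     n = int(math.log2(bracket_size))
--     rounds = []
--     v = bracket_size // 4
--     for _ in range(n - 1):
--         rounds.append(v)
--         rounds.append(v)
--         v //= 2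
--     return rounds
-- ===== Notes on version B (the rewrite author's own statement) =====
-- stated objective: simpler
-- what changed: Replaces the survivors/winners-round simulation with parity branching and min() by a direct emission of pairs of a halving sequence starting at bracket_size//4, after proving the even-round min() is never binding.
import Mathlib
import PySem

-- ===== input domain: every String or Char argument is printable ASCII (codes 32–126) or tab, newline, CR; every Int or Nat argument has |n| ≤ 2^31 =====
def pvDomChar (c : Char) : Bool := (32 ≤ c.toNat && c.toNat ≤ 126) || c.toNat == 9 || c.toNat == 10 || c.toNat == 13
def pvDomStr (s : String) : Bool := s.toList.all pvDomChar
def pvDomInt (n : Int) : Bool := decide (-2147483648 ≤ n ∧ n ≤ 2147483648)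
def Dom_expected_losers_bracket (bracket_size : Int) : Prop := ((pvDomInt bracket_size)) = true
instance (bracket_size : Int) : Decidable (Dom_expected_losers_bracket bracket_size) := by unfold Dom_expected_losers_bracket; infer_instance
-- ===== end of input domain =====

-- B replaces A's survivors/parity/min simulation with direct emission of pairs of a halving sequence (objective: simpler).


-- ===== PORT A =====
-- int(math.log2(b)) = floor(log2 b) = Nat.log2 for every 1 ≤ b ≤ 2^31 (exact on the admitted domain).
-- Loop body of A, step for step (Lean's 'matches' keyword forces the name 'matchCnt').
def pvStepA (bracket_size : Int) (st : List Int × Int) (lr : Int) : List Int × Int :=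
  if lr == 1 then
    let matchCnt := PySem.Int.floordiv st.2 2
    (st.1 ++ [matchCnt], matchCnt)
  else if PySem.Int.mod lr 2 == 0 then
    let w_round_idx := PySem.Int.floordiv lr 2
    -- 2 ** (w_round_idx + 1): Python int power; the exponent is ≥ 2 inside the loop, so .toNat is exact
    let w_round_matches := PySem.Int.floordiv bracket_size (2 ^ (w_round_idx + 1).toNat)
    let matchCnt := min st.2 w_round_matches
    (st.1 ++ [matchCnt], matchCnt)
  else
    let matchCnt := PySem.Int.floordiv st.2 2
    (st.1 ++ [matchCnt], matchCnt)

def expected_losers_bracket (bracket_size : Int) : List Int :=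
  ((PySem.List.pyRange 1 (2 * ((Nat.log2 bracket_size.toNat : Int) - 1) + 1) 1).foldl
    (pvStepA bracket_size) ([], PySem.Int.floordiv bracket_size 2)).1

-- ===== PORT B =====
def pvAltLoop : Nat → Int → List Int → List Int
  | 0, _, acc => acc
  | k + 1, v, acc => pvAltLoop k (PySem.Int.floordiv v 2) (acc ++ [v, v])

def expected_losers_bracket_alt (bracket_size : Int) : List Int :=
  pvAltLoop ((Nat.log2 bracket_size.toNat : Int) - 1).toNat (PySem.Int.floordiv bracket_size 4) []

-- ===== PRECONDITION & SPEC =====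
-- Pre_ excludes bracket_size ≤ 0, where math.log2 raises ValueError in A (and in B alike).
def Pre_expected_losers_bracket (bracket_size : Int) : Prop := 1 ≤ bracket_size
instance (bracket_size : Int) : Decidable (Pre_expected_losers_bracket bracket_size) := by unfold Pre_expected_losers_bracket; infer_instance
def pvWitness_expected_losers_bracket : Int := 16

def Spec_expected_losers_bracket (bracket_size : Int) (out : List Int) : Prop := out = expected_losers_bracket_alt bracket_size
instance (bracket_size : Int) (out : List Int) : Decidable (Spec_expected_losers_bracket bracket_size out) := by unfold Spec_expected_losers_bracket; infer_instance

-- ===== CLAIM (what is proved, stated in full; the proofs are below) =====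
def Claim_equal_expected_losers_bracket : Prop := ∀ (bracket_size : Int), Dom_expected_losers_bracket bracket_size → Pre_expected_losers_bracket bracket_size → Spec_expected_losers_bracket bracket_size (expected_losers_bracket bracket_size)

-- ===== LEMMAS AND PROOFS =====

-- (b // 2^k) // 2 = b // 2^(k+1) for 0 ≤ b
lemma pv_fdiv_pow (b : Int) (k : Nat) :
    PySem.Int.floordiv (PySem.Int.floordiv b (2 ^ k)) 2 = PySem.Int.floordiv b (2 ^ (k + 1)) := by
  rw [PySem.Int.floordiv_eq_ediv_of_pos (by positivity), PySem.Int.floordiv_eq_ediv_of_pos (by norm_num),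
      PySem.Int.floordiv_eq_ediv_of_pos (by positivity)]
  rw [Int.ediv_ediv_of_nonneg (by positivity)]
  ring_nf

-- an odd round 2j+1 (j ≥ 1): survivors b//2^(j+1) halve and one match count is appended
lemma pv_step_odd (b : Int) (j : Nat) (hj : 1 ≤ j) (acc : List Int) :
    pvStepA b (acc, PySem.Int.floordiv b (2 ^ (j + 1))) (2 * (j : Int) + 1)
      = (acc ++ [PySem.Int.floordiv b (2 ^ (j + 2))], PySem.Int.floordiv b (2 ^ (j + 2))) := by
  have hne1 : ¬ ((2 * (j:Int) + 1) = 1) := by omega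
  have hmod : PySem.Int.mod (2 * (j:Int) + 1) 2 = 1 := by
    rw [PySem.Int.mod_eq_emod_of_pos (by norm_num)]; omega
  simp only [pvStepA, beq_iff_eq, hne1, if_false, hmod]
  norm_num
  rw [Int.ediv_ediv_of_nonneg (by positivity)]
  ring_nf

-- the following even round 2j+2: min(survivors, b//2^(j+2)) = survivors, appended again
lemma pv_step_even (b : Int) (j : Nat) (acc : List Int) :
    pvStepA b (acc, PySem.Int.floordiv b (2 ^ (j + 2))) (2 * (j : Int) + 1 + 1)
      = (acc ++ [PySem.Int.floordiv b (2 ^ (j + 2))], PySem.Int.floordiv b (2 ^ (j + 2))) := by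
  have hne1 : ¬ ((2 * (j:Int) + 1 + 1) = 1) := by omega
  have hmod : PySem.Int.mod (2 * (j:Int) + 1 + 1) 2 = 0 := by
    rw [PySem.Int.mod_eq_emod_of_pos (by norm_num)]; omega
  have hdiv : PySem.Int.floordiv (2 * (j:Int) + 1 + 1) 2 = (j : Int) + 1 := by
    rw [PySem.Int.floordiv_eq_ediv_of_pos (by norm_num)]; omega
  have htn : (((j:Int) + 1) + 1).toNat = j + 2 := by omega
  simp only [pvStepA, beq_iff_eq, hne1, if_false, hmod, if_true, hdiv, htn, min_self]

-- the paired main loop: from survivors b//2^(j+1), rounds 2j+1, …, 2j+2m emit exactly pvAltLoop's pairs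
lemma pv_pair_loop (b : Int) :
    ∀ (m j : Nat) (acc : List Int), 1 ≤ j →
      ((PySem.List.pyRange (2 * (j : Int) + 1) (2 * (j : Int) + 1 + 2 * (m : Int)) 1).foldl (pvStepA b)
        (acc, PySem.Int.floordiv b (2 ^ (j + 1)))).1
      = pvAltLoop m (PySem.Int.floordiv b (2 ^ (j + 2))) acc := by
  intro m
  induction m with
  | zero =>
    intro j acc hj
    simp [PySem.List.pyRange, pvAltLoop]
  | succ m ih =>
    intro j acc hj
    rw [PySem.List.pyRange_one_cons (by push_cast; omega), List.foldl_cons,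
        pv_step_odd b j hj acc,
        PySem.List.pyRange_one_cons (by push_cast; omega), List.foldl_cons,
        pv_step_even b j _]
    have hlo : (2 * (j:Int) + 1 + 1) + 1 = 2 * ((j + 1 : Nat) : Int) + 1 := by push_cast; ring
    have hhi : (2 * (j:Int) + 1 + 2 * ((m + 1 : Nat) : Int)) = 2 * ((j + 1 : Nat) : Int) + 1 + 2 * (m : Int) := by push_cast; ring
    rw [hlo, hhi]
    have hih := ih (j + 1) (acc ++ [PySem.Int.floordiv b (2 ^ (j + 2))] ++ [PySem.Int.floordiv b (2 ^ (j + 2))]) (by omega)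
    rw [show (j + 1) + 1 = j + 2 from rfl] at hih
    rw [hih, show (j + 1) + 2 = (j + 2) + 1 from rfl, ← pv_fdiv_pow b (j + 2)]
    simp [pvAltLoop]

-- ===== VERDICT (by name: the statement is the Claim_ definition above) =====
theorem expected_losers_bracket_spec : Claim_equal_expected_losers_bracket := by
  intro b hdom hpre
  unfold Spec_expected_losers_bracket expected_losers_bracket expected_losers_bracket_alt
  set n : Nat := Nat.log2 b.toNat with hn
  rcases Nat.lt_or_ge n 2 with hlt | hge
  · -- n = 0 or 1: A's range is empty and B's loop runs 0 times
    have h1 : ((n : Int) - 1).toNat = 0 := by omega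
    have h2 : (2 * ((n : Int) - 1) + 1 - 1).toNat = 0 := by omega
    rw [PySem.List.pyRange_one, h2, h1]
    simp [pvAltLoop]
  · -- n ≥ 2: peel rounds 1 and 2, then the pair lemma with j = 1, m = n - 2
    rw [show (2 * ((n:Int) - 1) + 1) = 2 * ((1 : Nat) : Int) + 1 + 2 * ((n - 2 : Nat) : Int) by push_cast; omega]
    rw [PySem.List.pyRange_one_cons (by push_cast; omega), List.foldl_cons]
    have hstep1 : pvStepA b ([], PySem.Int.floordiv b 2) 1
        = ([PySem.Int.floordiv b (2 ^ 2)], PySem.Int.floordiv b (2 ^ 2)) := by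
      simp only [pvStepA, beq_self_eq_true, if_true]
      rw [show PySem.Int.floordiv b 2 = PySem.Int.floordiv b (2 ^ 1) by norm_num, pv_fdiv_pow b 1]
      simp
    rw [hstep1]
    rw [show ((1 : Int) + 1) = 2 * ((0 : Nat) : Int) + 1 + 1 by norm_num]
    rw [PySem.List.pyRange_one_cons (by push_cast; omega), List.foldl_cons]
    rw [show (PySem.Int.floordiv b (2 ^ 2)) = (PySem.Int.floordiv b (2 ^ (0 + 2))) from rfl,
        pv_step_even b 0 _]
    rw [show (2 * ((0 : Nat) : Int) + 1 + 1) + 1 = 2 * ((1 : Nat) : Int) + 1 by norm_num]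
    have hpl := pv_pair_loop b (n - 2) 1
      ([PySem.Int.floordiv b (2 ^ (0 + 2))] ++ [PySem.Int.floordiv b (2 ^ (0 + 2))]) (by omega)
    rw [show (1 : Nat) + 1 = 0 + 2 from rfl] at hpl
    rw [hpl]
    have hm : ((n : Int) - 1).toNat = (n - 2) + 1 := by omega
    rw [hm, pvAltLoop]
    rw [show PySem.Int.floordiv b 4 = PySem.Int.floordiv b (2 ^ 2) by norm_num, pv_fdiv_pow b 2]
    rw [show (1 : Nat) + 2 = 2 + 1 from rfl]
    simp
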